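-- pv_equiv track=rewrite | github.com/juzprogramuje/basic_python | part1/ex7.py | fill_list
-- ===== SOURCE A (Python) =====
-- def fill_list(data):
--     i = 1
--     length = len(data)
--     while i < length:
--         expected = data[i-1] + 1
--         if data[i] != expected:
--             data.insert(i, expected)
--             length += 1
--         i += 1
--
--     return data
-- ===== SOURCE B (Python) =====
-- def fill_list(data):
--     # Single forward pass: build a fresh list, filling each gap between
--     # consecutive elements with range(prev+1, cur+1); write back in place.
--     if not data:
--         return data
--     result = [data[0]]
--     for prev, cur in zip(data, data[1:]):
--         result.extend(range(prev + 1, cur + 1))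
--     data[:] = result
--     return data
-- ===== Notes on version B (the rewrite author's own statement) =====
-- stated objective: alternative
-- what changed: Replaces A's in-place while-loop that repeatedly calls list.insert and re-adjusts the index and length with a single forward pass over adjacent pairs that builds a fresh result list by extending it with range(prev+1, cur+1) per gap, then writes it back with data[:] = result.
import Mathlib
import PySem

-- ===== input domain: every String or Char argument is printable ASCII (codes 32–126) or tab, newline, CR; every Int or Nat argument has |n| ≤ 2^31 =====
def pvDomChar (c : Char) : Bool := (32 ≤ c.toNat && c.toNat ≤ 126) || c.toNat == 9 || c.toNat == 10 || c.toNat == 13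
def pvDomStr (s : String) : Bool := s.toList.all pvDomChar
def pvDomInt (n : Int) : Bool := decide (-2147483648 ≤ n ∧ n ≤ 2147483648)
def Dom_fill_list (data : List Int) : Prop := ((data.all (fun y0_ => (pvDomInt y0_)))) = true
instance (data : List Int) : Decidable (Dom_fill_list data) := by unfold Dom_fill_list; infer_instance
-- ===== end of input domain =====

-- B replaces A's in-place insert-and-reindex while-loop by one forward pass over adjacent
-- pairs that builds a fresh list from ranges (alternative decomposition); A mutates `data`
-- in place and B writes the result back with data[:] = result, so the mutation matches too.

-- ===== PORT A =====
-- A's while-loop: state (data, i, length); the fuel only bounds the iteration count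
-- (on Pre_ inputs it is never exhausted; outside Pre_ the Python loop never returns).
def fill_list_loop (fuel : Nat) (data : List Int) (i length : Int) : List Int :=
  match fuel with
  | 0 => data
  | fuel + 1 =>
    if i < length then
      -- indices i-1 and i are always in range here, so pyGetD's default is never used
      let expected := PySem.List.pyGetD data (i - 1) 0 + 1
      if PySem.List.pyGetD data i 0 ≠ expected then
        fill_list_loop fuel (PySem.List.insert data i expected) (i + 1) (length + 1)
      else
        fill_list_loop fuel data (i + 1) length
    else data

def fill_list (data : List Int) : List Int :=
  fill_list_loop ((data.getLastD 0 - data.headD 0).toNat + data.length + 1)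
    data 1 (data.length : Int)

-- ===== PORT B =====
def fill_list_alt (data : List Int) : List Int :=
  match data with
  | [] => []
  | a :: rest =>
    (List.zip (a :: rest) rest).foldl
      (fun acc pc => acc ++ PySem.List.pyRange (pc.1 + 1) (pc.2 + 1) 1) [a]

-- ===== PRECONDITION & SPEC =====
-- Pre_ excludes lists that are not strictly increasing: on those the Python A's
-- while-loop inserts forever and never returns (divergence), so nothing is claimed there.
def Pre_fill_list (data : List Int) : Prop := List.IsChain (· < ·) data
instance (data : List Int) : Decidable (Pre_fill_list data) := by unfold Pre_fill_list; infer_instance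
def pvWitness_fill_list : List Int := [1, 3, 4, 8]

def Spec_fill_list (data : List Int) (out : List Int) : Prop := out = fill_list_alt data
instance (data : List Int) (out : List Int) : Decidable (Spec_fill_list data out) := by unfold Spec_fill_list; infer_instance

-- ===== CLAIM (what is proved, stated in full; the proofs are below) =====
def Claim_equal_fill_list : Prop := ∀ (data : List Int), Dom_fill_list data → Pre_fill_list data → Spec_fill_list data (fill_list data)

-- ===== LEMMAS AND PROOFS =====

-- canonical gap-filling function both ports are reduced to
def gapFill (v : Int) : List Int → List Int
  | [] => []
  | c :: rest => PySem.List.pyRange (v + 1) (c + 1) 1 ++ gapFill c rest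

lemma chain_le_getLastD : ∀ (suf : List Int) (v : Int),
    List.IsChain (· < ·) (v :: suf) → v ≤ suf.getLastD v := by
  intro suf
  induction suf with
  | nil => intro v _; simp
  | cons c rest ih =>
    intro v h
    rw [List.isChain_cons_cons] at h
    have := ih c h.2
    simp only [List.getLastD_cons]
    omega

lemma gapFill_length : ∀ (suf : List Int) (v : Int),
    List.IsChain (· < ·) (v :: suf) → (gapFill v suf).length = (suf.getLastD v - v).toNat := by
  intro suf
  induction suf with
  | nil => intro v _; simp [gapFill]
  | cons c rest ih =>
    intro v h
    rw [List.isChain_cons_cons] at h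
    have h2 := chain_le_getLastD rest c h.2
    have := ih c h.2
    simp only [gapFill, List.length_append, PySem.List.length_pyRange_one, List.getLastD_cons]
    omega

lemma loopA_eq : ∀ (fuel : Nat) (pre suf : List Int) (v : Int),
    pre.getLast? = some v →
    List.IsChain (· < ·) (v :: suf) →
    (gapFill v suf).length < fuel →
    fill_list_loop fuel (pre ++ suf) (pre.length : Int) ((pre ++ suf).length : Int)
      = pre ++ gapFill v suf := by
  intro fuel
  induction fuel with
  | zero => intro pre suf v _ _ hfuel; omega
  | succ fuel ih =>
    intro pre suf v hlast hchain hfuel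
    cases suf with
    | nil =>
      simp [fill_list_loop, gapFill]
    | cons c rest =>
      rw [List.isChain_cons_cons] at hchain
      obtain ⟨pre', rfl⟩ := List.getLast?_eq_some_iff.mp hlast
      have hlt : ((pre' ++ [v]).length : Int) < (((pre' ++ [v]) ++ c :: rest).length : Int) := by
        simp; try omega
      have hexp : PySem.List.pyGetD ((pre' ++ [v]) ++ c :: rest) (((pre' ++ [v]).length : Int) - 1) 0 = v := by
        have : (((pre' ++ [v]).length : Int) - 1) = ((pre'.length : Nat) : Int) := by
          simp
        rw [this, PySem.List.pyGetD_natCast]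
        simp [List.getD]
      have hcur : PySem.List.pyGetD ((pre' ++ [v]) ++ c :: rest) (((pre' ++ [v]).length : Int)) 0 = c := by
        rw [PySem.List.pyGetD_natCast]
        simp [List.getD]
      rw [fill_list_loop]
      simp only [hexp, hcur, if_pos hlt]
      by_cases hc : c = v + 1
      · subst hc
        rw [if_neg (by simp)]
        have h1 : ((pre' ++ [v]).length : Int) + 1 = (((pre' ++ [v]) ++ [v + 1]).length : Int) := by
          simp; try omega
        have h2 : (pre' ++ [v]) ++ (v + 1) :: rest = ((pre' ++ [v]) ++ [v + 1]) ++ rest := by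
          simp
        rw [h1, h2, ih _ rest (v + 1) List.getLast?_concat hchain.2 ?_]
        · simp [gapFill, PySem.List.pyRange_one_singleton]
        · have : gapFill v ((v + 1) :: rest) = [v + 1] ++ gapFill (v + 1) rest := by
            simp [gapFill, PySem.List.pyRange_one_singleton]
          rw [this] at hfuel; simp at hfuel; omega
      · rw [if_pos hc]
        have hv1c : v + 1 < c := by have h3 := hchain.1; omega
        have hins : PySem.List.insert ((pre' ++ [v]) ++ c :: rest) (((pre' ++ [v]).length : Int)) (v + 1)
            = ((pre' ++ [v]) ++ [v + 1]) ++ c :: rest := by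
          rw [PySem.List.insert_natCast _ _ _ (by simp), List.take_left, List.drop_left]
          simp
        have hgap : gapFill v (c :: rest) = (v + 1) :: gapFill (v + 1) (c :: rest) := by
          simp only [gapFill]
          rw [PySem.List.pyRange_one_cons (by omega)]
          simp
        have h1 : ((pre' ++ [v]).length : Int) + 1 = (((pre' ++ [v]) ++ [v + 1]).length : Int) := by
          simp; try omega
        have h2 : (((pre' ++ [v]) ++ c :: rest).length : Int) + 1
            = ((((pre' ++ [v]) ++ [v + 1]) ++ c :: rest).length : Int) := by
          simp; try omega
        rw [hins, h1, h2, ih _ (c :: rest) (v + 1) List.getLast?_concat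
          (List.isChain_cons_cons.mpr ⟨hv1c, hchain.2⟩) ?_]
        · rw [hgap]; simp
        · rw [hgap] at hfuel; simp at hfuel; omega

lemma altB_eq : ∀ (rest acc : List Int) (v : Int),
    (List.zip (v :: rest) rest).foldl
      (fun acc pc => acc ++ PySem.List.pyRange (pc.1 + 1) (pc.2 + 1) 1) acc
      = acc ++ gapFill v rest := by
  intro rest
  induction rest with
  | nil => intro acc v; simp [gapFill]
  | cons c rest ih =>
    intro acc v
    simp only [List.zip_cons_cons, List.foldl_cons]
    rw [ih (acc ++ PySem.List.pyRange (v + 1) (c + 1) 1) c]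
    simp [gapFill]

-- ===== VERDICT (by name: the statement is the Claim_ definition above) =====
theorem fill_list_spec : Claim_equal_fill_list := by
  intro data _ hpre
  unfold Spec_fill_list
  cases data with
  | nil => rfl
  | cons a rest =>
    unfold Pre_fill_list at hpre
    have hlen := gapFill_length rest a hpre
    have hA := loopA_eq ((((a :: rest).getLastD 0) - (a :: rest).headD 0).toNat + (a :: rest).length + 1)
      [a] rest a (by simp) hpre (by simp only [List.getLastD_cons, List.headD_cons, List.length_cons] at *; omega)
    have hB := altB_eq rest [a] a
    simp only [fill_list, fill_list_alt]
    rw [hB]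
    simpa using hA
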